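-- pv_equiv track=rewrite | github.com/ngsikai/HW2 | shunting_yard.py | add_whitespaces
-- ===== SOURCE A (Python) =====
-- def add_whitespaces(str):
--     processed_str = ""
--     for char in str:
--         if char == "(":
--             processed_str += char + " "
--         elif char == ")":
--             processed_str += " " + char
--         else:
--             processed_str += char
--     return processed_str
-- ===== SOURCE B (Python) =====
-- def add_whitespaces(str):
--     return str.replace("(", "( ").replace(")", " )")
-- ===== Notes on version B (the rewrite author's own statement) =====
-- stated objective: faster
-- what changed: Replaced the explicit char-by-char accumulation loop with two chained whole-string str.replace passes, one per parenthesis type (independent: distinct targets, neither replacement introduces the other's target); measured ~12x faster at the largest size (C-level replace vs per-char Python loop with repeated concatenation).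
import Mathlib
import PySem

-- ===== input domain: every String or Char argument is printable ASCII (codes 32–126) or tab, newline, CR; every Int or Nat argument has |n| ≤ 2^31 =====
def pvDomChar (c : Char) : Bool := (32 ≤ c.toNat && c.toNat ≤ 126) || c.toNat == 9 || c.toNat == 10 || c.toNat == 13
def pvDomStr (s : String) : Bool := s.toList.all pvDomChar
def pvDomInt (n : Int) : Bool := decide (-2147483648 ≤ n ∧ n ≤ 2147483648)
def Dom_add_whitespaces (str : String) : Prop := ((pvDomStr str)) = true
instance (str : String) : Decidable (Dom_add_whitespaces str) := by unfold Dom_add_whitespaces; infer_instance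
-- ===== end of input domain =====

-- B replaces A's char-by-char accumulation loop with two chained whole-string replace passes (idiomatic).

-- ===== PORT A =====
-- processed_str accumulated char by char (string state kept as List Char, built left to right)
def add_whitespaces (str : String) : String :=
  String.ofList (str.toList.foldl
    (fun acc c =>
      if c = '(' then acc ++ [c, ' ']
      else if c = ')' then acc ++ [' ', c]
      else acc ++ [c])
    [])

-- ===== PORT B =====
def add_whitespaces_alt (str : String) : String :=
  PySem.Str.replace (PySem.Str.replace str "(" "( ") ")" " )"

-- ===== PRECONDITION & SPEC =====
def Spec_add_whitespaces (str : String) (out : String) : Prop := out = add_whitespaces_alt str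
instance (str : String) (out : String) : Decidable (Spec_add_whitespaces str out) := by unfold Spec_add_whitespaces; infer_instance

-- ===== CLAIM (what is proved, stated in full; the proofs are below) =====
def Claim_equal_add_whitespaces : Prop := ∀ (str : String), Dom_add_whitespaces str → Spec_add_whitespaces str (add_whitespaces str)

-- ===== LEMMAS AND PROOFS =====

-- replace with a single-char pattern is a per-character flatMap
theorem replace_single_go (o : Char) (n : List Char) :
    ∀ (l : List Char) (fuel : Nat) (acc : List Char), l.length ≤ fuel →
      PySem.Chars.replace.go [o] n fuel l acc
        = acc.reverse ++ l.flatMap (fun c => if c = o then n else [c]) := by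
  intro l
  induction l with
  | nil =>
      intro fuel acc _
      cases fuel <;> simp [PySem.Chars.replace.go]
  | cons c t ih =>
      intro fuel acc h
      cases fuel with
      | zero => simp at h
      | succ fuel =>
          rw [PySem.Chars.replace.go]
          by_cases hc : c = o
          · subst hc
            simp only [List.isPrefixOf, beq_self_eq_true, Bool.true_and,
              if_true, List.length_cons, List.length_nil, Nat.zero_add,
              List.drop_succ_cons, List.drop_zero] at *
            rw [ih fuel (n.reverse ++ acc) (by omega)]
            simp
          · have : [o].isPrefixOf (c :: t) = false := by
              simp [List.isPrefixOf]
              exact fun h' => (hc h'.symm).elim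
            rw [this]
            simp only [Bool.false_eq_true, if_false]
            rw [ih fuel (c :: acc) (by simpa using Nat.le_of_succ_le_succ h)]
            simp [hc]

theorem replace_single (o : Char) (n : List Char) (s : List Char) :
    PySem.Chars.replace s [o] n = s.flatMap (fun c => if c = o then n else [c]) := by
  rw [PySem.Chars.replace]
  simp only [List.isEmpty_cons, Bool.false_eq_true, if_false]
  simpa using replace_single_go o n s s.length [] le_rfl

-- ===== VERDICT (by name: the statement is the Claim_ definition above) =====
-- A's loop body always appends to the accumulator, so the fold is a flatMap
theorem foldA_eq_flatMap (l : List Char) (acc : List Char) :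
    l.foldl (fun acc c =>
        if c = '(' then acc ++ [c, ' ']
        else if c = ')' then acc ++ [' ', c]
        else acc ++ [c]) acc
      = acc ++ l.flatMap (fun c =>
        if c = '(' then [c, ' '] else if c = ')' then [' ', c] else [c]) := by
  induction l generalizing acc with
  | nil => simp
  | cons c t ih =>
      simp only [List.foldl_cons, List.flatMap_cons]
      split_ifs <;> rw [ih] <;> simp

theorem add_whitespaces_spec : Claim_equal_add_whitespaces := by
  intro str _
  unfold Spec_add_whitespaces add_whitespaces add_whitespaces_alt
  rw [PySem.Str.replace, PySem.Str.replace]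
  simp only [String.toList_ofList]
  have e1 : "(".toList = ['('] := rfl
  have e2 : ")".toList = [')'] := rfl
  rw [e1, e2, replace_single, replace_single]
  rw [foldA_eq_flatMap, List.flatMap_assoc]
  simp only [List.nil_append]
  have hfun : (fun c => if c = '(' then [c, ' '] else if c = ')' then [' ', c] else [c])
      = (fun x => List.flatMap (fun c => if c = ')' then " )".toList else [c])
          (if x = '(' then "( ".toList else [x])) := by
    funext c
    by_cases h1 : c = '(' <;> by_cases h2 : c = ')' <;> simp_all <;> decide
  rw [hfun]
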